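-- pv_equiv track=rewrite | github.com/TomWambsgans/XMSS-analysis | main.py | count_tuples
-- ===== SOURCE A (Python) =====
-- from math import comb, log2, ceil, floor
--
-- def count_tuples(w, v, d):
--     """
--     Count the number of integer tuples (x1, x2, ..., xv)
--     with 0 <= xi < w and x1 + ... + xv = d.
--     """
--     if d < 0 or d >= v * w:
--         assert False, "Invalid parameters"
--
--     total = 0
--     for k in range(0, v + 1):
--         term = d - k * w
--         if term < 0:
--             break
--         total += (-1)**k * comb(v, k) * comb(term + v - 1, v - 1)
--     return total
-- ===== SOURCE B (Python) =====
-- from math import comb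
--
-- def count_tuples(w, v, d):
--     """
--     Count the number of integer tuples (x1, x2, ..., xv)
--     with 0 <= xi < w and x1 + ... + xv = d.
--     """
--     if d < 0 or d >= v * w:
--         assert False, "Invalid parameters"
--
--     # Complement symmetry xi -> w-1-xi: the count for sum d equals the count
--     # for sum v*(w-1) - d, so aim at the smaller target e.
--     e = min(d, v * (w - 1) - d)
--     if e < 0:
--         return 0   # d exceeds the maximum possible sum v*(w-1)
--     # The answer is [x^e] (1 - x^w)^v / (1 - x)^v.  In the variable y = x^w the
--     # numerator only matters up to degree q = e // w: compute (1 - y)^v mod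
--     # y^(q+1) by binary exponentiation with truncated convolutions.
--     q = e // w
--
--     def mul(p1, p2):
--         r = [0] * (q + 1)
--         for i, a in enumerate(p1):
--             for j, b in enumerate(p2[:q + 1 - i]):
--                 r[i + j] += a * b
--         return r
--
--     num = [1] + [0] * q
--     base = [1, -1]
--     x = v
--     while x > 0:
--         if x & 1:
--             num = mul(num, base)
--         x >>= 1
--         if x:
--             base = mul(base, base)
--
--     # Dividing by (1 - x)^v convolves with the simplex counts C(t + v - 1, v - 1).
--     return sum(c * comb(e - k * w + v - 1, v - 1) for k, c in enumerate(num))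
-- ===== Notes on version B (the rewrite author's own statement) =====
-- stated objective: alternative
-- what changed: B computes the x^e coefficient of (1-x^w)^v/(1-x)^v (after reducing the target by the complement symmetry xi -> w-1-xi): the numerator is expanded mod y^(q+1), y = x^w, by binary exponentiation with truncated list convolutions and then convolved with simplex counts, instead of A's single closed-form loop over (-1)^k*comb(v,k)*comb(...) terms with a break.
-- outside the precondition, e.g. on count_tuples(-3, -2, 5): A returns 0, B raises ValueError
import Mathlib
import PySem

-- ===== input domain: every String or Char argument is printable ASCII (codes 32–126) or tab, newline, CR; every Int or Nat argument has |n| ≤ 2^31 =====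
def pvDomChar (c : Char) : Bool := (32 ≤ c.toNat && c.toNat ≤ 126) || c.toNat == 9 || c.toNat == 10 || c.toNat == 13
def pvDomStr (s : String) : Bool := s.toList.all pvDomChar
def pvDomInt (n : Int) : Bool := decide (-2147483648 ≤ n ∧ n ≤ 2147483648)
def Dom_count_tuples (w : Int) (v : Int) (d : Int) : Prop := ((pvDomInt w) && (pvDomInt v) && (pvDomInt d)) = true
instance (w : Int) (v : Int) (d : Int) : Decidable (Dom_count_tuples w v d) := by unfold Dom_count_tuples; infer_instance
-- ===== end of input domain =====

-- B expands the numerator (1-x^w)^v of the generating function by binary exponentiation with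
-- truncated list convolutions and convolves it with simplex counts, instead of A's closed-form
-- alternating sum of comb terms (alternative algorithm, similar cost).

-- ===== PORT A =====
-- math.comb(n, k) = C(n, k), computed as CPython does: a falling-factorial product of
-- min(k, n-k) terms divided by a factorial (combNat_eq_choose below proves it is C(n, k)).
-- Exact for n, k ≥ 0 (the only arguments A's loop passes under Pre_); Python raises on negative arguments.
def combNat (n k : ℕ) : ℕ :=
  if k ≤ n then n.descFactorial (min k (n - k)) / (min k (n - k)).factorial else 0

def pyComb (n k : Int) : Int := if 0 ≤ n ∧ 0 ≤ k then (combNat n.toNat k.toNat : Int) else 0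

-- the 'for k in range(0, v+1)' loop with its break: k counts up from 0, the fuel is the
-- number of remaining range elements (range is lazy in Python, so the list is never built)
def countLoopA (w v d : Int) : ℕ → Int → Int → Int
  | 0, _, total => total
  | n + 1, k, total =>
    let term := d - k * w
    if term < 0 then total
    else countLoopA w v d n (k + 1) (total + (-1) ^ k.toNat * pyComb v k * pyComb (term + v - 1) (v - 1))
    -- (-1)**k : exact for k ≥ 0, which every k in range(0, v+1) is

def count_tuples (w : Int) (v : Int) (d : Int) : Int :=
  if d < 0 ∨ v * w ≤ d then 0   -- A raises AssertionError here; excluded by Pre_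
  else countLoopA w v d (v + 1 - 0).toNat 0 0

-- ===== PORT B =====
-- inner loop 'for j, b in enumerate(p2[:q+1-i]): r[i+j] += a*b'; the in-place update is
-- List.set (exact here: on the admitted inputs every index i+j is nonnegative and < len r)
def mulInner (q i a : Int) : List Int → Int → List Int → List Int
  | [], _, r => r
  | b :: p2, j, r => mulInner q i a p2 (j + 1) (r.set (i + j).toNat (r.getD (i + j).toNat 0 + a * b))

-- outer loop 'for i, a in enumerate(p1): ...'
def mulOuter (q : Int) (p2 : List Int) : List Int → Int → List Int → List Int
  | [], _, r => r
  | a :: p1, i, r =>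
    mulOuter q p2 p1 (i + 1) (mulInner q i a (PySem.List.slice p2 none (some (q + 1 - i))) 0 r)

-- mul(p1, p2): r = [0]*(q+1), then the two nested loops
def mulB (q : Int) (p1 p2 : List Int) : List Int :=
  mulOuter q p2 p1 0 (List.replicate (q + 1).toNat 0)

-- 'while x > 0: ...': x & 1 is x % 2 and x >>= 1 is x / 2, exact for the positive x reached here
def powB (q : Int) (x : Int) (base num : List Int) : List Int :=
  if h : 0 < x then
    let num' := if x % 2 = 1 then mulB q num base else num
    let x' := x / 2
    let base' := if x' ≠ 0 then mulB q base base else base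
    powB q x' base' num'
  else num
termination_by x.toNat
decreasing_by omega

-- sum(c * comb(e - k*w + v - 1, v - 1) for k, c in enumerate(num))
def sumB (w v e : Int) : List (Int × Int) → Int → Int
  | [], total => total
  | (k, c) :: rest, total => sumB w v e rest (total + c * pyComb (e - k * w + v - 1) (v - 1))

def count_tuples_alt (w : Int) (v : Int) (d : Int) : Int :=
  if d < 0 ∨ v * w ≤ d then 0   -- B raises AssertionError here; excluded by Pre_
  else
    let e := min d (v * (w - 1) - d)
    if e < 0 then 0
    else
      let q := PySem.Int.floordiv e w
      let num := powB q v [1, -1] ((1 : Int) :: List.replicate q.toNat 0)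
      sumB w v e (PySem.List.enumerate num 0) 0

-- ===== PRECONDITION & SPEC =====
-- Pre_ excludes the inputs where both programs raise AssertionError (d < 0 or d ≥ v*w), and v ≤ 0
-- (reachable only with w < 0), where A's returned 0 is an accident of its empty range(0, v+1) loop —
-- no tuple count for a nonpositive number of variables is specified (B raises ValueError there).
def Pre_count_tuples (w : Int) (v : Int) (d : Int) : Prop :=
  0 ≤ d ∧ d < v * w ∧ 1 ≤ v
instance (w : Int) (v : Int) (d : Int) : Decidable (Pre_count_tuples w v d) := by
  unfold Pre_count_tuples; infer_instance

def pvWitness_count_tuples : Int × Int × Int := (3, 2, 4)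

def Spec_count_tuples (w : Int) (v : Int) (d : Int) (out : Int) : Prop := out = count_tuples_alt w v d
instance (w : Int) (v : Int) (d : Int) (out : Int) : Decidable (Spec_count_tuples w v d out) := by
  unfold Spec_count_tuples; infer_instance

-- ===== CLAIM (what is proved, stated in full; the proofs are below) =====
def Claim_equal_count_tuples : Prop := ∀ (w : Int) (v : Int) (d : Int), Dom_count_tuples w v d → Pre_count_tuples w v d → Spec_count_tuples w v d (count_tuples w v d)

-- ===== LEMMAS AND PROOFS =====

-- cc v t = (if 0 ≤ t then C(t+v-1, v-1) else 0): number of v-tuples of nonnegative integers summing to t (for v ≥ 1)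
def cc (v : ℕ) (t : ℤ) : ℤ := if 0 ≤ t then ((t.toNat + v - 1).choose (v - 1) : ℤ) else 0

-- A's mathematical value: the alternating inclusion-exclusion sum, with the broken-off terms zeroed
def G (w : Int) (v : ℕ) (d : ℤ) : ℤ :=
  ∑ k ∈ Finset.range (v + 1), (-1) ^ k * (v.choose k : ℤ) * cc v (d - k * w)

-- the bounded-composition count, by recursion on the number of variables (used for the symmetry step)
def M (w : Int) : ℕ → ℤ → ℤ
  | 0, t => if t = 0 then 1 else 0
  | v + 1, t => ∑ j ∈ Finset.range w.toNat, M w v (t - j)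

lemma M_neg (w : Int) : ∀ (v : ℕ) (t : ℤ), t < 0 → M w v t = 0 := by
  intro v
  induction v with
  | zero => intro t ht; simp only [M]; rw [if_neg (by omega)]
  | succ v ih => intro t ht; simp only [M]; exact Finset.sum_eq_zero fun j _ => ih _ (by omega)

lemma cc_pascal (v : ℕ) (hv : 1 ≤ v) (t : ℤ) : cc (v + 1) t - cc (v + 1) (t - 1) = cc v t := by
  unfold cc
  rcases lt_trichotomy t 0 with h | h | h
  · rw [if_neg (by omega), if_neg (by omega), if_neg (by omega)]; ring
  · subst h
    rw [if_pos le_rfl, if_neg (by omega), if_pos le_rfl]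
    simp [Nat.choose_self]
  · rw [if_pos (by omega), if_pos (by omega), if_pos (by omega)]
    have h2 : (t.toNat + (v + 1) - 1) = ((t - 1).toNat + (v + 1) - 1) + 1 := by omega
    have h3 : (v + 1 - 1) = (v - 1) + 1 := by omega
    rw [h2, h3, Nat.choose_succ_succ]
    have h4 : (t - 1).toNat + (v + 1) - 1 = t.toNat + v - 1 := by omega
    have h6 : (v - 1) + 1 = v := by omega
    rw [h4]
    simp only [Nat.succ_eq_add_one, h6]
    push_cast
    ring

lemma cc_telescope (v : ℕ) (hv : 1 ≤ v) (t : ℤ) (n : ℕ) :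
    ∑ j ∈ Finset.range n, cc v (t - j) = cc (v + 1) t - cc (v + 1) (t - n) := by
  induction n with
  | zero => simp
  | succ n ih =>
    rw [Finset.sum_range_succ, ih]
    have := cc_pascal v hv (t - n)
    have harg : t - (n : ℤ) - 1 = t - (n + 1 : ℕ) := by push_cast; ring
    rw [harg] at this
    linarith

lemma alt_pascal_sum (v : ℕ) (h : ℕ → ℤ) :
    ∑ k ∈ Finset.range (v + 2), (-1) ^ k * ((v + 1).choose k : ℤ) * h k
    = ∑ k ∈ Finset.range (v + 1), (-1) ^ k * (v.choose k : ℤ) * h k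
      - ∑ k ∈ Finset.range (v + 1), (-1) ^ k * (v.choose k : ℤ) * h (k + 1) := by
  have htop : ∑ i ∈ Finset.range (v + 1), (-1 : ℤ) ^ (i + 1) * (v.choose (i + 1) : ℤ) * h (i + 1)
      = ∑ i ∈ Finset.range v, (-1 : ℤ) ^ (i + 1) * (v.choose (i + 1) : ℤ) * h (i + 1) := by
    rw [Finset.sum_range_succ]; simp [Nat.choose_succ_self]
  have hsplit : ∑ i ∈ Finset.range (v + 1), (-1 : ℤ) ^ (i + 1) * ((v + 1).choose (i + 1) : ℤ) * h (i + 1)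
      = ∑ i ∈ Finset.range (v + 1), (-1 : ℤ) ^ (i + 1) * (v.choose i : ℤ) * h (i + 1)
        + ∑ i ∈ Finset.range (v + 1), (-1 : ℤ) ^ (i + 1) * (v.choose (i + 1) : ℤ) * h (i + 1) := by
    rw [← Finset.sum_add_distrib]
    refine Finset.sum_congr rfl fun i _ => ?_
    rw [Nat.choose_succ_succ]; push_cast; ring
  have hneg : ∑ i ∈ Finset.range (v + 1), (-1 : ℤ) ^ (i + 1) * (v.choose i : ℤ) * h (i + 1)
      = - ∑ i ∈ Finset.range (v + 1), (-1 : ℤ) ^ i * (v.choose i : ℤ) * h (i + 1) := by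
    rw [← Finset.sum_neg_distrib]
    refine Finset.sum_congr rfl fun i _ => ?_
    ring
  rw [Finset.sum_range_succ' _ (v + 1), hsplit, htop, hneg,
    Finset.sum_range_succ' (fun k => (-1 : ℤ) ^ k * (v.choose k : ℤ) * h k) v]
  simp only [pow_zero, Nat.choose_zero_right, Nat.cast_one]
  ring

lemma G_step (w : Int) (hw : 1 ≤ w) (v : ℕ) (hv : 1 ≤ v) (d : ℤ) :
    G w (v + 1) d = ∑ j ∈ Finset.range w.toNat, G w v (d - j) := by
  have hwt : ((w.toNat : ℤ)) = w := by omega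
  have rhs_eq : ∑ j ∈ Finset.range w.toNat, G w v (d - j)
      = ∑ k ∈ Finset.range (v + 1), (-1) ^ k * (v.choose k : ℤ) *
          (cc (v + 1) (d - k * w) - cc (v + 1) (d - k * w - w)) := by
    unfold G
    rw [Finset.sum_comm]
    refine Finset.sum_congr rfl fun k _ => ?_
    rw [← Finset.mul_sum]
    congr 1
    calc ∑ j ∈ Finset.range w.toNat, cc v (d - j - k * w)
        = ∑ j ∈ Finset.range w.toNat, cc v ((d - k * w) - j) := by
          refine Finset.sum_congr rfl fun j _ => ?_; ring_nf
      _ = cc (v + 1) (d - k * w) - cc (v + 1) (d - k * w - w.toNat) := cc_telescope v hv _ _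
      _ = cc (v + 1) (d - k * w) - cc (v + 1) (d - k * w - w) := by rw [hwt]
  rw [rhs_eq]
  unfold G
  have := alt_pascal_sum v (fun k => cc (v + 1) (d - k * w))
  simp only [] at this
  rw [show v + 1 + 1 = v + 2 from rfl, this, ← Finset.sum_sub_distrib]
  refine Finset.sum_congr rfl fun k _ => ?_
  have harg : d - (k + 1 : ℕ) * w = d - k * w - w := by push_cast; ring
  rw [harg]
  ring

lemma ind_sum (t : ℤ) (n : ℕ) :
    ∑ j ∈ Finset.range n, (if t - (j : ℤ) = 0 then (1 : ℤ) else 0)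
    = if 0 ≤ t ∧ t < n then 1 else 0 := by
  induction n with
  | zero => simp
  | succ n ih =>
    rw [Finset.sum_range_succ, ih]
    push_cast
    split_ifs <;> omega

lemma G_one (w : Int) (hw : 1 ≤ w) (t : ℤ) : G w 1 t = M w 1 t := by
  have h1 : ∀ x : ℤ, cc 1 x = if 0 ≤ x then 1 else 0 := by
    intro x; simp [cc]
  simp only [M, G, Finset.sum_range_succ, Finset.sum_range_zero]
  rw [ind_sum t w.toNat]
  rw [h1, h1]
  norm_num
  split_ifs <;> omega

lemma G_eq_M (w : Int) (hw : 1 ≤ w) : ∀ (n : ℕ) (t : ℤ), G w (n + 1) t = M w (n + 1) t := by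
  intro n
  induction n with
  | zero => exact G_one w hw
  | succ n ih =>
    intro t
    rw [G_step w hw (n + 1) (by omega) t]
    simp only [M]
    exact Finset.sum_congr rfl fun j _ => ih _

-- complement symmetry x ↦ w-1-x of the bounded-composition count
lemma M_symm (w : Int) (hw : 1 ≤ w) : ∀ (v : ℕ) (t : ℤ), M w v t = M w v ((v : ℤ) * (w - 1) - t) := by
  intro v
  induction v with
  | zero =>
    intro t
    simp only [M, Nat.cast_zero, zero_mul, zero_sub]
    split_ifs <;> omega
  | succ v ih =>
    intro t
    simp only [M]
    rw [← Finset.sum_range_reflect (fun j => M w v (((v : ℕ) + 1 : ℕ) * (w - 1) - t - j)) w.toNat]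
    refine Finset.sum_congr rfl fun j hj => ?_
    have hjw : j < w.toNat := Finset.mem_range.mp hj
    rw [ih (t - j)]
    congr 1
    have hc : ((w.toNat - 1 - j : ℕ) : ℤ) = w - 1 - j := by omega
    rw [hc]
    push_cast
    ring

-- ===== A-port ↔ G =====

lemma combNat_eq_choose (n k : ℕ) : combNat n k = n.choose k := by
  unfold combNat
  by_cases hk : k ≤ n
  · rw [if_pos hk]
    by_cases h2 : k ≤ n - k
    · rw [min_eq_left h2, Nat.choose_eq_descFactorial_div_factorial]
    · rw [min_eq_right (by omega), ← Nat.choose_eq_descFactorial_div_factorial,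
        Nat.choose_symm hk]
  · rw [if_neg hk, Nat.choose_eq_zero_of_lt (by omega)]

lemma loopA_eq (w v d : Int) (hw : 1 ≤ w) (hv : 1 ≤ v) :
    ∀ (n : ℕ) (a : Int), 0 ≤ a → n = (v + 1 - a).toNat → ∀ (total : Int),
    countLoopA w v d n a total
    = total + ∑ k ∈ Finset.Ico a.toNat (v + 1).toNat,
        (-1 : ℤ) ^ k * (v.toNat.choose k : ℤ) * cc v.toNat (d - k * w) := by
  intro n
  induction n with
  | zero =>
    intro a ha hn total
    rw [Finset.Ico_eq_empty (by simp; omega)]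
    simp [countLoopA]
  | succ n ih =>
    intro a ha hn total
    show (if d - a * w < 0 then total else _) = _
    have hbot : a.toNat < (v + 1).toNat := by omega
    by_cases hterm : d - a * w < 0
    · rw [if_pos hterm]
      have hz : ∑ k ∈ Finset.Ico a.toNat (v + 1).toNat,
          (-1 : ℤ) ^ k * (v.toNat.choose k : ℤ) * cc v.toNat (d - k * w) = 0 := by
        refine Finset.sum_eq_zero fun k hk => ?_
        have hka : (a.toNat : ℤ) ≤ (k : ℤ) := by
          exact_mod_cast (Finset.mem_Ico.mp hk).1
        have haz : (a.toNat : ℤ) = a := by omega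
        have hmul : a * w ≤ (k : ℤ) * w :=
          mul_le_mul_of_nonneg_right (by omega) (by omega)
        have : cc v.toNat (d - k * w) = 0 := by
          unfold cc; rw [if_neg (by omega)]
        rw [this]; ring
      rw [hz, add_zero]
    · rw [if_neg hterm]
      rw [ih (a + 1) (by omega) (by omega)]
      rw [Finset.sum_eq_sum_Ico_succ_bot hbot]
      have hnat : (a + 1).toNat = a.toNat + 1 := by omega
      rw [hnat, add_assoc]
      congr 2
      have haz : ((a.toNat : ℤ)) = a := by omega
      have hc1 : pyComb v a = (v.toNat.choose a.toNat : ℤ) := by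
        unfold pyComb; rw [if_pos ⟨by omega, ha⟩, combNat_eq_choose]
      have hc2 : pyComb (d - a * w + v - 1) (v - 1)
          = (cc v.toNat (d - a * w)) := by
        unfold pyComb cc
        rw [if_pos ⟨by omega, by omega⟩, if_pos (by omega), combNat_eq_choose]
        congr 2 <;> omega
      have hcc : cc v.toNat (d - (a.toNat : ℤ) * w) = cc v.toNat (d - a * w) := by rw [haz]
      rw [hc1, hc2, hcc]

lemma count_tuples_eq_G (w v d : Int) (hw : 1 ≤ w) (hv : 1 ≤ v) (hd : 0 ≤ d) (hlt : d < v * w) :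
    count_tuples w v d = G w v.toNat d := by
  unfold count_tuples
  rw [if_neg (by omega)]
  rw [loopA_eq w v d hw hv (v + 1 - 0).toNat 0 le_rfl rfl 0]
  unfold G
  rw [zero_add]
  have h1 : (v + 1).toNat = v.toNat + 1 := by omega
  rw [h1, show (0 : Int).toNat = 0 from rfl, ← Finset.range_eq_Ico]

-- ===== B-port: the convolution computes polynomial multiplication =====

lemma getD_set (r : List Int) (m k : ℕ) (x : Int) :
    (r.set m x).getD k 0 = if k = m ∧ m < r.length then x else r.getD k 0 := by
  simp only [List.getD_eq_getElem?_getD, List.getElem?_set]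
  split_ifs with h1 h2 h3 h4 <;> simp_all

lemma inner_spec (q i a : Int) (hi : 0 ≤ i) :
    ∀ (p2 : List Int) (j0 : ℕ) (r : List Int), r.length = q.toNat + 1 →
    (i + j0 + p2.length ≤ q + 1) →
    (mulInner q i a p2 (j0 : Int) r).length = q.toNat + 1 ∧
    (∀ k ≤ q.toNat, (mulInner q i a p2 (j0 : Int) r).getD k 0
      = r.getD k 0 + a * (if i.toNat + j0 ≤ k ∧ k < i.toNat + j0 + p2.length
          then p2.getD (k - i.toNat - j0) 0 else 0)) := by
  intro p2
  induction p2 with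
  | nil =>
    intro j0 r hr _
    refine ⟨hr, fun k hk => ?_⟩
    simp [mulInner]
  | cons b p2 ih =>
    intro j0 r hr hlen
    have hcast : ((j0 : Int) + 1) = ((j0 + 1 : ℕ) : Int) := by push_cast; ring
    have hij : (i + j0).toNat = i.toNat + j0 := by omega
    have hijlt : i.toNat + j0 < r.length := by simp only [List.length_cons] at hlen; omega
    have hset : (r.set (i + (j0 : Int)).toNat (r.getD (i + (j0 : Int)).toNat 0 + a * b)).length
        = q.toNat + 1 := by simp [hr]
    have hrec := ih (j0 + 1)
      (r.set (i + (j0 : Int)).toNat (r.getD (i + (j0 : Int)).toNat 0 + a * b))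
      hset (by simp only [List.length_cons] at hlen; push_cast; omega)
    refine ⟨?_, ?_⟩
    · show (mulInner q i a p2 ((j0 : Int) + 1) _).length = q.toNat + 1
      rw [hcast]; exact hrec.1
    · intro k hk
      show (mulInner q i a p2 ((j0 : Int) + 1) _).getD k 0 = _
      rw [hcast, hrec.2 k hk, hij, getD_set]
      simp only [List.length_cons]
      by_cases hkm : k = i.toNat + j0
      · rw [if_pos ⟨hkm, hijlt⟩]
        rw [if_neg (by omega)]
        subst hkm
        rw [if_pos ⟨by omega, by omega⟩]
        have : i.toNat + j0 - i.toNat - j0 = 0 := by omega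
        rw [this]
        simp only [List.getD_cons_zero]
        ring
      · rw [if_neg (by intro hc; exact hkm hc.1)]
        by_cases hin : i.toNat + (j0 + 1) ≤ k ∧ k < i.toNat + (j0 + 1) + p2.length
        · rw [if_pos hin, if_pos ⟨by omega, by omega⟩]
          have : k - i.toNat - j0 = (k - i.toNat - (j0 + 1)) + 1 := by omega
          rw [this]
          simp
        · rw [if_neg hin, if_neg (by intro hc; exact hin ⟨by omega, by omega⟩)]

lemma outer_spec (q : Int) (hq : 0 ≤ q) (p2 : List Int) :
    ∀ (p1 : List Int) (i0 : ℕ) (r : List Int), r.length = q.toNat + 1 →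
    (mulOuter q p2 p1 (i0 : Int) r).length = q.toNat + 1 ∧
    (∀ k ≤ q.toNat, (mulOuter q p2 p1 (i0 : Int) r).getD k 0
      = r.getD k 0 + ∑ t ∈ Finset.range p1.length,
          (if i0 + t ≤ k then p1.getD t 0 * p2.getD (k - i0 - t) 0 else 0)) := by
  intro p1
  induction p1 with
  | nil =>
    intro i0 r hr
    exact ⟨hr, fun k hk => by simp [mulOuter]⟩
  | cons a p1 ih =>
    intro i0 r hr
    have hcast : ((i0 : Int) + 1) = ((i0 + 1 : ℕ) : Int) := by push_cast; ring
    -- the sliced second factor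
    set p2' := PySem.List.slice p2 none (some (q + 1 - (i0 : Int))) with hp2'
    by_cases hbig : (i0 : Int) ≤ q
    · -- slice bound q+1-i0 ≥ 1: p2' = p2.take (q+1-i0).toNat
      have hslice : p2' = p2.take (q + 1 - (i0 : Int)).toNat :=
        PySem.List.slice_to _ (by omega)
      have hlen2 : (i0 : Int) + 0 + p2'.length ≤ q + 1 := by
        rw [hslice]
        have := List.length_take_le (q + 1 - (i0 : Int)).toNat p2
        have h2 : (p2.take (q + 1 - (i0 : Int)).toNat).length ≤ (q + 1 - (i0 : Int)).toNat :=
          List.length_take_le _ _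
        omega
      have hin := inner_spec q (i0 : Int) a (by omega) p2' 0 r hr hlen2
      simp only [Nat.cast_zero, Int.toNat_natCast, add_zero, Nat.sub_zero] at hin
      have hrec := ih (i0 + 1) _ hin.1
      refine ⟨?_, ?_⟩
      · show (mulOuter q p2 p1 ((i0 : Int) + 1) _).length = _
        rw [hcast]; exact hrec.1
      · intro k hk
        show (mulOuter q p2 p1 ((i0 : Int) + 1) _).getD k 0 = _
        rw [hcast, hrec.2 k hk, hin.2 k hk]
        rw [List.length_cons, Finset.sum_range_succ' _ p1.length]
        simp only [List.getD_cons_succ, List.getD_cons_zero, add_zero, Nat.sub_zero]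
        have hA : (a * if i0 ≤ k ∧ k < i0 + p2'.length then p2'.getD (k - i0) 0 else 0)
            = (if i0 ≤ k then a * p2.getD (k - i0) 0 else 0) := by
          by_cases hik : i0 ≤ k
          · rw [if_pos hik]
            by_cases hklt : k < i0 + p2'.length
            · rw [if_pos ⟨hik, hklt⟩]
              congr 1
              rw [hslice] at hklt ⊢
              have hlt : k - i0 < (q + 1 - (i0 : Int)).toNat := by omega
              rw [List.getD_eq_getElem?_getD, List.getD_eq_getElem?_getD,
                List.getElem?_take_of_lt hlt]
            · rw [if_neg (fun hc => hklt hc.2)]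
              have hp2len : p2'.length = min (q + 1 - (i0 : Int)).toNat p2.length := by
                rw [hslice, List.length_take]
              have hout : p2.length ≤ k - i0 := by omega
              rw [List.getD_eq_getElem?_getD, List.getElem?_eq_none (by omega)]
              simp
          · rw [if_neg (fun hc => hik hc.1), if_neg hik]
            ring
        have hS : ∑ t ∈ Finset.range p1.length,
              (if i0 + 1 + t ≤ k then p1.getD t 0 * p2.getD (k - (i0 + 1) - t) 0 else 0)
            = ∑ t ∈ Finset.range p1.length,
              (if i0 + (t + 1) ≤ k then p1.getD t 0 * p2.getD (k - i0 - (t + 1)) 0 else 0) := by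
          refine Finset.sum_congr rfl fun t _ => ?_
          by_cases hc : i0 + 1 + t ≤ k
          · rw [if_pos hc, if_pos (by omega),
              show k - (i0 + 1) - t = k - i0 - (t + 1) from by omega]
          · rw [if_neg hc, if_neg (by omega)]
        rw [hA, hS]
        ring

    · -- i0 > q: every write lands at index i0 + j ≥ q+1 = len r, so the inner loop is a no-op
      have hnoop : ∀ (l : List Int) (j : ℕ) (r' : List Int), r'.length = q.toNat + 1 →
          mulInner q (i0 : Int) a l (j : Int) r' = r' := by
        intro l
        induction l with
        | nil => intro j r' _; rfl
        | cons b l ihl =>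
          intro j r' hr'
          show mulInner q (i0 : Int) a l ((j : Int) + 1) _ = r'
          have hset : r'.set ((i0 : Int) + (j : Int)).toNat
              (r'.getD ((i0 : Int) + (j : Int)).toNat 0 + a * b) = r' :=
            List.set_eq_of_length_le (by omega)
          rw [hset, show ((j : Int) + 1) = ((j + 1 : ℕ) : Int) from by push_cast; ring,
            ihl (j + 1) r' hr']
      have h0 : mulInner q (i0 : Int) a p2' ((0 : ℕ) : Int) r = r := hnoop p2' 0 r hr
      have hrec := ih (i0 + 1) r hr
      refine ⟨?_, ?_⟩
      · show (mulOuter q p2 p1 ((i0 : Int) + 1) (mulInner q (i0 : Int) a p2' 0 r)).length = _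
        rw [show ((0 : ℕ) : Int) = (0 : Int) from rfl] at h0
        rw [h0, hcast]
        exact hrec.1
      · intro k hk
        show (mulOuter q p2 p1 ((i0 : Int) + 1) (mulInner q (i0 : Int) a p2' 0 r)).getD k 0 = _
        rw [show ((0 : ℕ) : Int) = (0 : Int) from rfl] at h0
        rw [h0, hcast, hrec.2 k hk]
        have hz1 : ∑ t ∈ Finset.range p1.length,
            (if (i0 + 1) + t ≤ k then p1.getD t 0 * p2.getD (k - (i0 + 1) - t) 0 else 0) = 0 :=
          Finset.sum_eq_zero fun t _ => by rw [if_neg (by omega)]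
        have hz2 : ∑ t ∈ Finset.range (a :: p1).length,
            (if i0 + t ≤ k then (a :: p1).getD t 0 * p2.getD (k - i0 - t) 0 else 0) = 0 := by
          refine Finset.sum_eq_zero fun t _ => by rw [if_neg (by omega)]
        rw [hz1, hz2]

lemma mulB_spec (q : Int) (hq : 0 ≤ q) (p1 p2 : List Int) :
    (mulB q p1 p2).length = q.toNat + 1 ∧
    (∀ k ≤ q.toNat, (mulB q p1 p2).getD k 0
      = ∑ t ∈ Finset.range (k + 1), p1.getD t 0 * p2.getD (k - t) 0) := by
  have hlen : (List.replicate (q + 1).toNat (0 : Int)).length = q.toNat + 1 := by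
    simp; omega
  have h := outer_spec q hq p2 p1 0 (List.replicate (q + 1).toNat 0) hlen
  unfold mulB
  simp only [Nat.cast_zero] at h
  refine ⟨h.1, fun k hk => ?_⟩
  rw [h.2 k hk, List.getD_eq_getElem?_getD, List.getElem?_replicate]
  have hz : ((if k < (q + 1).toNat then some (0 : Int) else none).getD 0) = 0 := by
    split_ifs <;> rfl
  rw [hz, zero_add]
  simp only [zero_add, Nat.sub_zero]
  set L := p1.length with hL
  set N := max L (k + 1) with hN
  set g : ℕ → ℤ := fun t => p1.getD t 0 * p2.getD (k - t) 0 with hg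
  have hzero : ∀ t, L ≤ t → g t = 0 := by
    intro t ht
    rw [hg]
    simp only []
    rw [List.getD_eq_getElem?_getD, List.getElem?_eq_none (by omega)]
    simp
  have hA1 : ∑ t ∈ Finset.range L, (if t ≤ k then g t else 0)
      = ∑ t ∈ Finset.range N, (if t ≤ k then g t else 0) := by
    refine Finset.sum_subset (fun x hx => Finset.mem_range.mpr ?_) (fun t _ ht => ?_)
    · have := Finset.mem_range.mp hx; omega
    · have hLt : L ≤ t := by
        have : ¬ t < L := fun hc => ht (Finset.mem_range.mpr hc)
        omega
      rw [hzero t hLt]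
      split_ifs <;> rfl
  have hA2 : ∑ t ∈ Finset.range (k + 1), g t
      = ∑ t ∈ Finset.range N, (if t ≤ k then g t else 0) := by
    have hinner : ∑ t ∈ Finset.range (k + 1), g t
        = ∑ t ∈ Finset.range (k + 1), (if t ≤ k then g t else 0) :=
      Finset.sum_congr rfl (fun t ht => (if_pos (by have := Finset.mem_range.mp ht; omega)).symm)
    rw [hinner]
    refine Finset.sum_subset (fun x hx => Finset.mem_range.mpr ?_) (fun t _ ht => ?_)
    · have := Finset.mem_range.mp hx; omega
    · rw [if_neg (by
        have : ¬ t < k + 1 := fun hc => ht (Finset.mem_range.mpr hc)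
        omega)]
  rw [hA1, ← hA2]

-- ===== Polynomial bridge =====

-- l represents p up to degree qn
def RepP (qn : ℕ) (l : List Int) (p : Polynomial ℤ) : Prop := ∀ k ≤ qn, l.getD k 0 = p.coeff k

lemma mulB_rep (q : Int) (hq : 0 ≤ q) (l1 l2 : List Int) (p1 p2 : Polynomial ℤ)
    (h1 : RepP q.toNat l1 p1) (h2 : RepP q.toNat l2 p2) :
    RepP q.toNat (mulB q l1 l2) (p1 * p2) := by
  intro k hk
  rw [(mulB_spec q hq l1 l2).2 k hk, Polynomial.coeff_mul,
    Finset.Nat.sum_antidiagonal_eq_sum_range_succ_mk]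
  refine Finset.sum_congr rfl fun t ht => ?_
  have htk := Finset.mem_range.mp ht
  rw [h1 t (by omega), h2 (k - t) (by omega)]

lemma powB_rep (q : Int) (hq : 0 ≤ q) :
    ∀ (n : ℕ) (x : Int), x.toNat = n →
    ∀ (base num : List Int) (B N : Polynomial ℤ),
    RepP q.toNat base B → RepP q.toNat num N →
    (RepP q.toNat (powB q x base num) (N * B ^ x.toNat) ∧
     (0 < x → (powB q x base num).length = q.toNat + 1)) := by
  intro n
  induction n using Nat.strong_induction_on with
  | _ n ih =>
    intro x hx base num B N hB hN
    by_cases hpos : 0 < x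
    · rw [powB, dif_pos hpos]
      have hx2 : (x / 2).toNat < n := by omega
      set num' := if x % 2 = 1 then mulB q num base else num with hnum'
      set base' := if x / 2 ≠ 0 then mulB q base base else base with hbase'
      have hN' : RepP q.toNat num' (N * B ^ (x % 2).toNat) := by
        rw [hnum']
        by_cases hodd : x % 2 = 1
        · rw [if_pos hodd, hodd]
          simpa using mulB_rep q hq num base N B hN hB
        · rw [if_neg hodd, show (x % 2).toNat = 0 from by omega]
          simpa using hN
      have hB' : RepP q.toNat base' (if x / 2 ≠ 0 then B * B else B) := by
        rw [hbase']
        split_ifs with hc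
        · exact mulB_rep q hq base base B B hB hB
        · exact hB
      have hres := ih (x / 2).toNat hx2 (x / 2) rfl base' num'
        (if x / 2 ≠ 0 then B * B else B) (N * B ^ (x % 2).toNat) hB' hN'
      constructor
      · have harith : N * B ^ (x % 2).toNat * (if x / 2 ≠ 0 then B * B else B) ^ (x / 2).toNat
            = N * B ^ x.toNat := by
          split_ifs with hc
          · calc N * B ^ (x % 2).toNat * (B * B) ^ (x / 2).toNat
                = N * B ^ ((x % 2).toNat + 2 * (x / 2).toNat) := by
                  rw [← pow_two, ← pow_mul, mul_assoc, ← pow_add]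
              _ = N * B ^ x.toNat := by
                  rw [show (x % 2).toNat + 2 * (x / 2).toNat = x.toNat from by omega]
          · rw [show (x / 2).toNat = 0 from by omega, pow_zero, mul_one,
              show (x % 2).toNat = x.toNat from by omega]
        rw [← harith]
        exact hres.1
      · intro _
        by_cases hc : 0 < x / 2
        · exact hres.2 hc
        · -- x = 1: the recursive call returns num' immediately, and num' = mulB (since 1 % 2 = 1)
          rw [powB, dif_neg (by omega)]
          rw [hnum', if_pos (by omega)]
          exact (mulB_spec q hq num base).1
    · rw [powB, dif_neg hpos]
      exact ⟨by rw [show x.toNat = 0 from by omega, pow_zero, mul_one]; exact hN, by omega⟩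

-- coefficients of (1 - X)^n
lemma coeff_one_sub_X_pow (n k : ℕ) :
    ((1 - Polynomial.X : Polynomial ℤ) ^ n).coeff k = (-1) ^ k * (n.choose k : ℤ) := by
  induction n generalizing k with
  | zero =>
    simp only [pow_zero, Polynomial.coeff_one]
    rcases Nat.eq_zero_or_pos k with h | h
    · subst h; simp
    · rw [if_neg (by omega), Nat.choose_eq_zero_of_lt (by omega)]
      simp
  | succ n ihn =>
    rw [pow_succ, mul_sub, mul_one, Polynomial.coeff_sub]
    rcases Nat.eq_zero_or_pos k with h | h
    · subst h
      rw [Polynomial.coeff_mul_X_zero, ihn]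
      simp
    · obtain ⟨m, rfl⟩ : ∃ m, k = m + 1 := ⟨k - 1, by omega⟩
      rw [Polynomial.coeff_mul_X, ihn, ihn, Nat.choose_succ_succ]
      push_cast
      ring

-- ===== the final enumerate-sum =====

lemma sumB_spec (w v e : Int) : ∀ (l : List Int) (s : Int) (total : Int),
    sumB w v e (PySem.List.enumerate l s) total
    = total + ∑ k ∈ Finset.range l.length,
        l.getD k 0 * pyComb (e - (s + k) * w + v - 1) (v - 1) := by
  intro l
  induction l with
  | nil => intro s total; simp [PySem.List.enumerate_nil, sumB]
  | cons c l ihl =>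
    intro s total
    rw [PySem.List.enumerate_cons]
    show sumB w v e (PySem.List.enumerate l (s + 1))
      (total + c * pyComb (e - s * w + v - 1) (v - 1)) = _
    rw [ihl, List.length_cons, Finset.sum_range_succ' _ l.length]
    simp only [List.getD_cons_succ, List.getD_cons_zero, Nat.cast_zero, Nat.cast_add,
      Nat.cast_one, add_zero]
    have harg : ∀ t : ℕ, e - (s + 1 + (t : Int)) * w + v - 1 = e - (s + ((t : Int) + 1)) * w + v - 1 := by
      intro t; ring_nf
    have hsum : ∑ t ∈ Finset.range l.length,
        l.getD t 0 * pyComb (e - (s + 1 + (t : Int)) * w + v - 1) (v - 1)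
        = ∑ t ∈ Finset.range l.length,
        l.getD t 0 * pyComb (e - (s + ((t : Int) + 1)) * w + v - 1) (v - 1) := by
      refine Finset.sum_congr rfl fun t _ => ?_
      rw [harg t]
    rw [hsum]
    ring

lemma count_tuples_alt_eq (w v d : Int) (hw : 1 ≤ w) (hv : 1 ≤ v) (hd : 0 ≤ d) (hlt : d < v * w) :
    count_tuples_alt w v d = M w v.toNat d := by
  unfold count_tuples_alt
  rw [if_neg (by omega)]
  simp only []
  set e := min d (v * (w - 1) - d) with he_def
  have hvt : ((v.toNat : ℤ)) = v := by omega
  have hsymm := M_symm w hw v.toNat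
  rw [hvt] at hsymm
  have hMe : 0 ≤ e → M w v.toNat e = M w v.toNat d := by
    intro _
    by_cases hmin : d ≤ v * (w - 1) - d
    · rw [he_def, min_eq_left hmin]
    · rw [he_def, min_eq_right (by omega)]
      rw [hsymm (v * (w - 1) - d)]
      rw [show v * (w - 1) - (v * (w - 1) - d) = d from by ring]
  by_cases hneg : e < 0
  · rw [if_pos hneg]
    -- e < 0 forces v*(w-1) < d: the count is 0 because the maximum possible sum is exceeded
    have hsd : v * (w - 1) - d < 0 := by
      by_contra hc
      push Not at hc
      have : 0 ≤ e := le_min hd hc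
      omega
    rw [hsymm d, M_neg w v.toNat _ hsd]
  · rw [if_neg hneg]
    have he0 : 0 ≤ e := by omega
    set q := PySem.Int.floordiv e w with hq_def
    have hfd_le : ∀ z : Int, z ≤ q ↔ z * w ≤ e := fun z => PySem.Int.le_floordiv_iff_mul_le (by omega)
    have hfd_lt : ∀ z : Int, q < z ↔ e < z * w := fun z => PySem.Int.floordiv_lt_iff_lt_mul (by omega)
    have hq0 : 0 ≤ q := (hfd_le 0).mpr (by rw [zero_mul]; exact he0)
    have hqv : q < v := (hfd_lt v).mpr (lt_of_le_of_lt (min_le_left _ _) hlt)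
    clear_value q e
    clear he_def hq_def
    -- the computed numerator coefficients are those of (1 - X)^v
    have hbase : RepP q.toNat [1, -1] (1 - Polynomial.X) := by
      intro k hk
      match k with
      | 0 => simp [Polynomial.coeff_one, Polynomial.coeff_X]
      | 1 => simp [Polynomial.coeff_one, Polynomial.coeff_X]
      | (k + 2) =>
        rw [Polynomial.coeff_sub, Polynomial.coeff_one, Polynomial.coeff_X]
        rw [if_neg (by omega), if_neg (by omega)]
        simp [List.getD]
    have hnum0 : RepP q.toNat ((1 : Int) :: List.replicate q.toNat 0) 1 := by
      intro k hk
      match k with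
      | 0 => simp
      | (m + 1) =>
        rw [Polynomial.coeff_one, if_neg (by omega)]
        simp only [List.getD_cons_succ]
        rw [List.getD_eq_getElem?_getD, List.getElem?_replicate]
        split_ifs <;> rfl
    have hrep := powB_rep q hq0 v.toNat v rfl [1, -1]
      ((1 : Int) :: List.replicate q.toNat 0) (1 - Polynomial.X) 1 hbase hnum0
    set num := powB q v [1, -1] ((1 : Int) :: List.replicate q.toNat 0) with hnum_def
    have hlen : num.length = q.toNat + 1 := hrep.2 (by omega)
    have hnumrep : RepP q.toNat num ((1 - Polynomial.X) ^ v.toNat) := by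
      have := hrep.1
      rwa [one_mul] at this
    -- evaluate the final sum
    rw [sumB_spec w v e num 0 0, zero_add, hlen]
    have hterm : ∀ k ∈ Finset.range (q.toNat + 1),
        num.getD k 0 * pyComb (e - ((0 : Int) + k) * w + v - 1) (v - 1)
        = (-1 : ℤ) ^ k * (v.toNat.choose k : ℤ) * cc v.toNat (e - k * w) := by
      intro k hk
      have hkq : k ≤ q.toNat := by have := Finset.mem_range.mp hk; omega
      have hkw : (k : ℤ) * w ≤ e := (hfd_le k).mp (by omega)
      rw [hnumrep k hkq, coeff_one_sub_X_pow]
      have hc2 : pyComb (e - ((0 : Int) + k) * w + v - 1) (v - 1) = cc v.toNat (e - k * w) := by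
        unfold pyComb cc
        rw [zero_add, if_pos ⟨by omega, by omega⟩, if_pos (by omega), combNat_eq_choose]
        congr 2 <;> omega
      rw [hc2]
    rw [Finset.sum_congr rfl hterm]
    have hsub : Finset.range (q.toNat + 1) ⊆ Finset.range (v.toNat + 1) :=
      fun x hx => Finset.mem_range.mpr (by
        have h2 := Finset.mem_range.mp hx
        have h1 := Int.toNat_le_toNat (le_of_lt hqv)
        omega)
    have hvanish : ∀ k ∈ Finset.range (v.toNat + 1), k ∉ Finset.range (q.toNat + 1) →
        (-1 : ℤ) ^ k * (v.toNat.choose k : ℤ) * cc v.toNat (e - k * w) = 0 := by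
      intro k _ hk
      have hkq : q < (k : ℤ) := by
        have : ¬ k < q.toNat + 1 := fun hc => hk (Finset.mem_range.mpr hc)
        omega
      have : e < (k : ℤ) * w := (hfd_lt k).mp hkq
      have hcc : cc v.toNat (e - k * w) = 0 := by unfold cc; rw [if_neg (by omega)]
      rw [hcc]; ring
    rw [Finset.sum_subset hsub hvanish, ← G]
    have hv1 : v.toNat = (v.toNat - 1) + 1 := by omega
    rw [hv1, G_eq_M w hw (v.toNat - 1) e, ← hv1, hMe he0]

-- ===== VERDICT (by name: the statement is the Claim_ definition above) =====
theorem count_tuples_spec : Claim_equal_count_tuples := by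
  intro w v d _hdom hpre
  obtain ⟨hd, hlt, hv⟩ := hpre
  have hw : 1 ≤ w := by
    by_contra h
    push Not at h
    have : v * w ≤ 0 := mul_nonpos_iff.mpr (Or.inl ⟨by omega, by omega⟩)
    omega
  unfold Spec_count_tuples
  rw [count_tuples_eq_G w v d hw hv hd hlt, count_tuples_alt_eq w v d hw hv hd hlt]
  have hv1 : v.toNat = (v.toNat - 1) + 1 := by omega
  rw [hv1]
  exact G_eq_M w hw (v.toNat - 1) d
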